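-- pv_equiv track=rewrite | github.com/JayRathod341997/Applied-AI | gen-ai-course/11_fine-tuning/04_fine_tuning_projects/fine_tuning_projects/04_ecommerce/src/ecommerce_ft/data.py | _fallback_bitext_samples
-- ===== SOURCE A (Python) =====
-- def _fallback_bitext_samples(max_samples: int) -> list[dict[str, str]]:
--     seed_rows = [
--         {
--             "instruction": "My package says delivered but I did not receive it. What can you do?",
--             "input": "Order status: delivered 4 hours ago. Item: wireless mouse.",
--             "output": "I am sorry this happened. I can start a missing package claim and offer a replacement or refund based on your preference.",
--             "source": "bitext_customer_support",
--         },
--         {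
--             "instruction": "Can I return shoes after 20 days if worn once indoors?",
--             "input": "Return policy: 30 days. Condition: lightly used allowed for footwear.",
--             "output": "Yes, this qualifies for return within 30 days. Please use the returns portal and select the original order.",
--             "source": "bitext_customer_support",
--         },
--         {
--             "instruction": "How long does international shipping take to Germany?",
--             "input": "Shipping options: standard 7-12 business days, express 3-5 business days.",
--             "output": "Standard shipping usually takes 7 to 12 business days, and express shipping takes 3 to 5 business days.",
--             "source": "bitext_customer_support",
--         },
--     ]
--     rows: list[dict[str, str]] = []
--     while len(rows) < max_samples:
--         rows.extend(seed_rows)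
--     return rows[:max_samples]
-- ===== SOURCE B (Python) =====
-- def _fallback_bitext_samples(max_samples: int) -> list[dict[str, str]]:
--     seed_rows = [
--         {
--             "instruction": "My package says delivered but I did not receive it. What can you do?",
--             "input": "Order status: delivered 4 hours ago. Item: wireless mouse.",
--             "output": "I am sorry this happened. I can start a missing package claim and offer a replacement or refund based on your preference.",
--             "source": "bitext_customer_support",
--         },
--         {
--             "instruction": "Can I return shoes after 20 days if worn once indoors?",
--             "input": "Return policy: 30 days. Condition: lightly used allowed for footwear.",
--             "output": "Yes, this qualifies for return within 30 days. Please use the returns portal and select the original order.",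
--             "source": "bitext_customer_support",
--         },
--         {
--             "instruction": "How long does international shipping take to Germany?",
--             "input": "Shipping options: standard 7-12 business days, express 3-5 business days.",
--             "output": "Standard shipping usually takes 7 to 12 business days, and express shipping takes 3 to 5 business days.",
--             "source": "bitext_customer_support",
--         },
--     ]
--     needed = max(0, max_samples)
--     q, r = divmod(needed, len(seed_rows))
--     return seed_rows * q + seed_rows[:r]
-- ===== Notes on version B (the rewrite author's own statement) =====
-- stated objective: idiomatic
-- what changed: Computes the exact number of full repeats and the remainder with divmod and assembles seed_rows * q + seed_rows[:r] in closed form, instead of extend-in-a-loop until long enough and then truncating.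
import Mathlib
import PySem

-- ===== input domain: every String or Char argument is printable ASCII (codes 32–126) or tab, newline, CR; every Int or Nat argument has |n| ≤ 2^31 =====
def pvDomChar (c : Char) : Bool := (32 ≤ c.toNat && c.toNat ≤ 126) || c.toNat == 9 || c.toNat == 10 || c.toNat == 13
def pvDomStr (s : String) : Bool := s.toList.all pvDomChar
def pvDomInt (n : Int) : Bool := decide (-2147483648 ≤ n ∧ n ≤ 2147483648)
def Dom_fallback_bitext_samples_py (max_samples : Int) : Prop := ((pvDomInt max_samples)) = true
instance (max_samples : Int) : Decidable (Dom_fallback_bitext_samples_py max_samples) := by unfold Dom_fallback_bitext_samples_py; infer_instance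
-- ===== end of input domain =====

-- B replaces A's extend-until-long-enough loop + truncation by computing the repeat
-- count and remainder with divmod and assembling the result in closed form (idiomatic).

-- the literal seed_rows constant shared by both Pythons
def pvSeedRows : List (List (String × String)) :=
  [ [("instruction", "My package says delivered but I did not receive it. What can you do?"),
     ("input", "Order status: delivered 4 hours ago. Item: wireless mouse."),
     ("output", "I am sorry this happened. I can start a missing package claim and offer a replacement or refund based on your preference."),
     ("source", "bitext_customer_support")],
    [("instruction", "Can I return shoes after 20 days if worn once indoors?"),
     ("input", "Return policy: 30 days. Condition: lightly used allowed for footwear."),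
     ("output", "Yes, this qualifies for return within 30 days. Please use the returns portal and select the original order."),
     ("source", "bitext_customer_support")],
    [("instruction", "How long does international shipping take to Germany?"),
     ("input", "Shipping options: standard 7-12 business days, express 3-5 business days."),
     ("output", "Standard shipping usually takes 7 to 12 business days, and express shipping takes 3 to 5 business days."),
     ("source", "bitext_customer_support")] ]

-- ===== PORT A =====
-- the 'while len(rows) < max_samples: rows.extend(seed_rows)' loop
def pvALoop (max_samples : Int) (rows : List (List (String × String))) :
    List (List (String × String)) :=
  if (rows.length : Int) < max_samples then pvALoop max_samples (rows ++ pvSeedRows) else rows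
termination_by (max_samples - rows.length).toNat
decreasing_by simp [pvSeedRows]; omega

def fallback_bitext_samples_py (max_samples : Int) : List (List (String × String)) :=
  PySem.List.slice (pvALoop max_samples []) none (some max_samples)   -- rows[:max_samples]

-- ===== PORT B =====
def fallback_bitext_samples_py_alt (max_samples : Int) : List (List (String × String)) :=
  let needed : Int := max 0 max_samples
  let q : Int := PySem.Int.floordiv needed (pvSeedRows.length : Int)
  let r : Int := PySem.Int.mod needed (pvSeedRows.length : Int)
  (List.replicate q.toNat pvSeedRows).flatten ++ PySem.List.slice pvSeedRows none (some r)

-- ===== PRECONDITION & SPEC =====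
def Spec_fallback_bitext_samples_py (max_samples : Int) (out : List (List (String × String))) : Prop := out = fallback_bitext_samples_py_alt max_samples
instance (max_samples : Int) (out : List (List (String × String))) : Decidable (Spec_fallback_bitext_samples_py max_samples out) := by unfold Spec_fallback_bitext_samples_py; infer_instance

-- ===== CLAIM (what is proved, stated in full; the proofs are below) =====
def Claim_equal_fallback_bitext_samples_py : Prop := ∀ (max_samples : Int), Dom_fallback_bitext_samples_py max_samples → Spec_fallback_bitext_samples_py max_samples (fallback_bitext_samples_py max_samples)

-- ===== LEMMAS AND PROOFS =====

theorem pvSeedRows_length : pvSeedRows.length = 3 := rfl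

-- closed form of A's while-loop
theorem pvALoop_eq (max_samples : Int) (rows : List (List (String × String))) :
    pvALoop max_samples rows
      = rows ++ (List.replicate (((max_samples - rows.length).toNat + 2) / 3) pvSeedRows).flatten := by
  fun_induction pvALoop max_samples rows with
  | case1 rows h ih =>
      rw [ih]
      have hlen : (rows ++ pvSeedRows).length = rows.length + 3 := by
        simp [pvSeedRows_length]
      rw [hlen]
      have hk : ((max_samples - rows.length).toNat + 2) / 3
          = ((max_samples - ((rows.length : Int) + 3)).toNat + 2) / 3 + 1 := by omega
      rw [hk, List.replicate_succ, List.flatten_cons, List.append_assoc]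
      push_cast
      ring_nf
  | case2 rows h =>
      have : (max_samples - rows.length).toNat = 0 := by omega
      simp [this]

-- take of a flattened replicate of a length-3 block
theorem take_flatten_replicate (K n : ℕ) (hn : n ≤ 3 * K) :
    ((List.replicate K pvSeedRows).flatten).take n
      = (List.replicate (n / 3) pvSeedRows).flatten ++ pvSeedRows.take (n % 3) := by
  induction K generalizing n with
  | zero =>
      have : n = 0 := by omega
      simp [this]
  | succ K ih =>
      rw [List.replicate_succ, List.flatten_cons, List.take_append]
      by_cases h3 : n < 3
      · have h03 : n / 3 = 0 := by omega
        have hm : n % 3 = n := by omega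
        have : n - pvSeedRows.length = 0 := by rw [pvSeedRows_length]; omega
        simp [this, h03, hm]
      · have htake : pvSeedRows.take n = pvSeedRows :=
          List.take_of_length_le (by rw [pvSeedRows_length]; omega)
        rw [htake, pvSeedRows_length, ih (n - 3) (by omega)]
        have hq : n / 3 = (n - 3) / 3 + 1 := by omega
        have hm : n % 3 = (n - 3) % 3 := by omega
        rw [hq, hm, List.replicate_succ, List.flatten_cons, List.append_assoc]

-- ===== VERDICT (by name: the statement is the Claim_ definition above) =====
theorem fallback_bitext_samples_py_spec : Claim_equal_fallback_bitext_samples_py := by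
  intro m _
  unfold Spec_fallback_bitext_samples_py fallback_bitext_samples_py fallback_bitext_samples_py_alt
  rw [pvALoop_eq, List.nil_append]
  simp only [List.length_nil, Int.natCast_zero, sub_zero]
  by_cases hm : m ≤ 0
  · have hmax : max 0 m = ((0:Nat) : Int) := by omega
    have h0 : (m.toNat + 2) / 3 = 0 := by omega
    rw [h0, hmax, pvSeedRows_length, PySem.Int.floordiv_natCast, PySem.Int.mod_natCast]
    simp [PySem.List.slice, PySem.List.clampIdx]
  · have hmax : max 0 m = ((m.toNat : ℕ) : Int) := by omega
    rw [hmax, pvSeedRows_length]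
    rw [PySem.Int.floordiv_natCast, PySem.Int.mod_natCast, Int.toNat_natCast,
      PySem.List.slice_to_natCast, PySem.List.slice_to _ (by omega : (0:Int) ≤ m)]
    exact take_flatten_replicate _ _ (by omega)
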